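-- pv_equiv track=rewrite | github.com/maberbac/gestion-condos | scripts/recreate_schemas.py | _determine_table_order
-- ===== SOURCE A (Python) =====
-- from typing import List, Dict, Any
--
-- def _determine_table_order(tables: Dict[str, str]) -> List[str]:
--     """
--     Détermine l'ordre optimal de création des tables selon les dépendances.
--
--     Args:
--         tables: Dictionnaire des tables et leurs SQL
--
--     Returns:
--         Liste des noms de tables dans l'ordre de création
--     """
--     # Ordre logique basé sur les dépendances connues
--     priority_order = [
--         'schema_migrations',    # Table système en premier
--         'system_config',       # Configuration système
--         'feature_flags',       # Flags de fonctionnalités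
--         'projects',           # Projets (référencés par units)
--         'units',              # Unités (dépend de projects)
--         'users',              # Utilisateurs
--         'financial_records'   # Records financiers (dépend potentiellement d'autres tables)
--     ]
--
--     # Ajouter les tables connues dans l'ordre de priorité
--     ordered_tables = []
--     for table in priority_order:
--         if table in tables:
--             ordered_tables.append(table)
--
--     # Ajouter les tables restantes
--     for table in tables:
--         if table not in ordered_tables:
--             ordered_tables.append(table)
--
--     return ordered_tables
-- ===== SOURCE B (Python) =====
-- from typing import List, Dict
--
-- _PRIORITY = [
--     'schema_migrations',
--     'system_config',
--     'feature_flags',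
--     'projects',
--     'units',
--     'users',
--     'financial_records',
-- ]
--
-- def _determine_table_order(tables: Dict[str, str]) -> List[str]:
--     """Bucket the table names by priority rank in one pass, then flatten."""
--     rank = {name: i for i, name in enumerate(_PRIORITY)}
--     buckets = [[] for _ in range(len(_PRIORITY) + 1)]
--     for table in tables:
--         buckets[rank.get(table, len(_PRIORITY))].append(table)
--     return [t for bucket in buckets for t in bucket]
-- ===== Notes on version B (the rewrite author's own statement) =====
-- stated objective: faster
-- what changed: Replaces A's two passes (a scan of the priority list with membership tests, then a scan of the keys with a membership test against the growing result list) by building a name-to-rank dict once and distributing the keys into rank buckets in a single pass, then flattening; Pre_ requires distinct keys, which is automatic for the Python dict argument.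
import Mathlib
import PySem

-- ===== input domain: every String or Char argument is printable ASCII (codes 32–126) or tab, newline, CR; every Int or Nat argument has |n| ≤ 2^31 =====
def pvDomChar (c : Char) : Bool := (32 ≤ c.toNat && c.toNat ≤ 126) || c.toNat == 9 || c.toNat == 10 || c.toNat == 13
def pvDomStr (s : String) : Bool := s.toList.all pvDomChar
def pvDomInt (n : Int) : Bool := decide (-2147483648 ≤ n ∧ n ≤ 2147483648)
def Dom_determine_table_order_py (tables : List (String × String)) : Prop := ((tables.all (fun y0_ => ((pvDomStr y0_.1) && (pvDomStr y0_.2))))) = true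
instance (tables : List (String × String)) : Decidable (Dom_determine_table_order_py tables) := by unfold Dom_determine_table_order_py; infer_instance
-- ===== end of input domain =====

-- B builds a name→rank dict once and distributes the keys into rank buckets in one pass,
-- then flattens, instead of A's priority scan plus a second pass whose membership test
-- against the growing result list is quadratic (objective: faster, measured).

-- ===== PORT A =====
def pvPriorityOrder : List String :=
  ["schema_migrations", "system_config", "feature_flags", "projects",
   "units", "users", "financial_records"]

def determine_table_order_py (tables : List (String × String)) : List String :=
  -- for table in priority_order: if table in tables: ordered_tables.append(table)
  let ordered := pvPriorityOrder.foldl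
    (fun acc t => if (tables.map Prod.fst).contains t then acc ++ [t] else acc) []
  -- for table in tables: if table not in ordered_tables: ordered_tables.append(table)
  (tables.map Prod.fst).foldl
    (fun acc t => if acc.contains t then acc else acc ++ [t]) ordered

-- ===== PORT B =====
def determine_table_order_py_alt (tables : List (String × String)) : List String :=
  -- rank = {name: i for i, name in enumerate(_PRIORITY)}
  let rank : PySem.Dict String Int :=
    (PySem.List.enumerate pvPriorityOrder).foldl (fun d p => d.insert p.2 p.1) PySem.Dict.empty
  -- buckets = [[] for _ in range(len(_PRIORITY) + 1)]; one pass appending each key to its bucket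
  let buckets := (tables.map Prod.fst).foldl
    (fun bs t => bs.modify ((rank.getD t (pvPriorityOrder.length : Int)).toNat) (· ++ [t]))
    (List.replicate (pvPriorityOrder.length + 1) ([] : List String))
  -- return [t for bucket in buckets for t in bucket]
  buckets.flatten

-- ===== PRECONDITION & SPEC =====
-- Pre_ requires the keys of the association list to be pairwise distinct: the argument
-- models a Python dict, whose keys are necessarily distinct, so no input that the Python
-- function can actually receive is excluded.
def Pre_determine_table_order_py (tables : List (String × String)) : Prop :=
  (tables.map Prod.fst).Nodup
instance (tables : List (String × String)) : Decidable (Pre_determine_table_order_py tables) := by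
  unfold Pre_determine_table_order_py; infer_instance

def pvWitness_determine_table_order_py : (List (String × String)) :=
  [("units", "CREATE TABLE units"), ("zzz", "CREATE TABLE zzz"), ("projects", "p")]

def Spec_determine_table_order_py (tables : List (String × String)) (out : List String) : Prop := out = determine_table_order_py_alt tables
instance (tables : List (String × String)) (out : List String) : Decidable (Spec_determine_table_order_py tables out) := by unfold Spec_determine_table_order_py; infer_instance

-- ===== CLAIM (what is proved, stated in full; the proofs are below) =====
def Claim_equal_determine_table_order_py : Prop := ∀ (tables : List (String × String)), Dom_determine_table_order_py tables → Pre_determine_table_order_py tables → Spec_determine_table_order_py tables (determine_table_order_py tables)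

-- ===== LEMMAS AND PROOFS =====

-- the rank B's dict assigns to a name, written as an if-chain
def pvRankOf (t : String) : Nat :=
  if t = "schema_migrations" then 0
  else if t = "system_config" then 1
  else if t = "feature_flags" then 2
  else if t = "projects" then 3
  else if t = "units" then 4
  else if t = "users" then 5
  else if t = "financial_records" then 6
  else 7

lemma pvRank_getD (t : String) :
    (((PySem.List.enumerate pvPriorityOrder).foldl (fun d p => d.insert p.2 p.1)
        PySem.Dict.empty).getD t (pvPriorityOrder.length : Int)).toNat = pvRankOf t := by
  have h : ((PySem.List.enumerate pvPriorityOrder).foldl (fun d p => d.insert p.2 p.1)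
        PySem.Dict.empty) = PySem.Dict.mk
      [("schema_migrations", 0), ("system_config", 1), ("feature_flags", 2), ("projects", 3),
       ("units", 4), ("users", 5), ("financial_records", 6)] := by decide
  rw [h]
  simp only [PySem.Dict.getD_eq_get?_getD, PySem.Dict.get?_mk_cons]
  unfold pvRankOf pvPriorityOrder
  split_ifs <;> simp_all <;> try rfl

-- the bucket loop, pointwise: bucket i collects exactly the keys of rank i, in order
lemma pvBucket_ptw (f : String → Nat) (ks : List String) (bs : List (List String)) (i : Nat) :
    (ks.foldl (fun bs t => bs.modify (f t) (· ++ [t])) bs)[i]?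
      = bs[i]?.map (· ++ ks.filter (fun t => f t = i)) := by
  induction ks generalizing bs with
  | nil => simp
  | cons x ks ih =>
    simp only [List.foldl_cons, ih, List.getElem?_modify, List.filter_cons]
    by_cases h : f x = i
    · simp [h, Option.map_map, Function.comp_def, List.append_assoc]
    · simp [h]

-- A's second loop: with distinct keys it appends exactly the keys not already present
lemma pvDedup_loop (ks acc : List String) (hnd : ks.Nodup) :
    ks.foldl (fun acc t => if acc.contains t then acc else acc ++ [t]) acc
      = acc ++ ks.filter (fun t => !acc.contains t) := by
  induction ks generalizing acc with
  | nil => simp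
  | cons x ks ih =>
    have hnd' := hnd.of_cons
    have hx : x ∉ ks := (List.nodup_cons.mp hnd).1
    simp only [List.foldl_cons, List.filter_cons]
    by_cases h : acc.contains x
    · rw [if_pos h, ih _ hnd']
      have hm : x ∈ acc := by simpa using h
      simp [hm]
    · rw [if_neg h, ih _ hnd']
      have hcong : ks.filter (fun t => !(acc ++ [x]).contains t)
                 = ks.filter (fun t => !acc.contains t) :=
        List.filter_congr (fun t ht => by
          have hne : t ≠ x := fun e => hx (e ▸ ht)
          simp [hne])
      rw [hcong]
      have hm : x ∉ acc := by simpa using h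
      simp [hm]

-- filtering a nodup list by equality with a fixed name
lemma pvFilter_eq_single (ks : List String) (a : String) (hnd : ks.Nodup) :
    ks.filter (fun t => t = a) = if ks.contains a then [a] else [] := by
  have hfun : (fun t : String => decide (t = a)) = (· == a) := by
    funext t; by_cases h : t = a <;> simp [h]
  rw [show (fun t : String => decide (t = a)) = (· == a) from hfun, List.filter_beq]
  by_cases h : a ∈ ks
  · simp [h, List.count_eq_one_of_mem hnd h]
  · simp [h, List.count_eq_zero_of_not_mem h]

-- the concatenation of the per-name filters is the priority list filtered by membership
lemma pvConcat_filters (ps ks : List String) (hnd : ks.Nodup) :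
    (ps.map (fun p => ks.filter (fun t => t = p))).flatten
      = ps.filter (fun p => ks.contains p) := by
  induction ps with
  | nil => simp
  | cons p ps ih =>
    simp only [List.map_cons, List.flatten_cons, List.filter_cons, ih,
      pvFilter_eq_single ks p hnd]
    by_cases h : p ∈ ks <;> simp [h]

lemma pvRank7_iff (t : String) : pvRankOf t = 7 ↔ t ∉ pvPriorityOrder := by
  unfold pvRankOf pvPriorityOrder; split_ifs <;> simp_all

-- ===== VERDICT (by name: the statement is the Claim_ definition above) =====
theorem determine_table_order_py_spec : Claim_equal_determine_table_order_py := by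
  intro tables _ hpre
  unfold Spec_determine_table_order_py determine_table_order_py determine_table_order_py_alt
  dsimp only
  set ks := tables.map Prod.fst with hks
  have hnd : ks.Nodup := hpre
  -- B's bucket loop uses pvRankOf
  have hstep : (fun (bs : List (List String)) (t : String) =>
        bs.modify ((((PySem.List.enumerate pvPriorityOrder).foldl (fun d p => d.insert p.2 p.1)
          PySem.Dict.empty).getD t (pvPriorityOrder.length : Int)).toNat) (· ++ [t]))
      = (fun bs t => bs.modify (pvRankOf t) (· ++ [t])) := by
    funext bs t; rw [pvRank_getD]
  rw [hstep]
  -- the buckets as an explicit eight-element list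
  have hb : ks.foldl (fun bs t => bs.modify (pvRankOf t) (· ++ [t]))
        (List.replicate (pvPriorityOrder.length + 1) ([] : List String))
      = [ks.filter (fun t => pvRankOf t = 0), ks.filter (fun t => pvRankOf t = 1),
         ks.filter (fun t => pvRankOf t = 2), ks.filter (fun t => pvRankOf t = 3),
         ks.filter (fun t => pvRankOf t = 4), ks.filter (fun t => pvRankOf t = 5),
         ks.filter (fun t => pvRankOf t = 6), ks.filter (fun t => pvRankOf t = 7)] := by
    apply List.ext_getElem?
    intro i
    rw [pvBucket_ptw]
    rcases i with _|_|_|_|_|_|_|_|i <;> simp [pvPriorityOrder, List.replicate]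
  rw [hb]
  -- A's two loops
  rw [PySem.List.foldl_append_if_eq_filter, pvDedup_loop ks _ hnd]
  -- rank-i filters are per-name filters (i < 7) resp. the non-priority filter (i = 7)
  have e0 : ks.filter (fun t => pvRankOf t = 0) = ks.filter (fun t => t = "schema_migrations") :=
    List.filter_congr (fun t _ => by unfold pvRankOf; split_ifs <;> simp_all)
  have e1 : ks.filter (fun t => pvRankOf t = 1) = ks.filter (fun t => t = "system_config") :=
    List.filter_congr (fun t _ => by unfold pvRankOf; split_ifs <;> simp_all)
  have e2 : ks.filter (fun t => pvRankOf t = 2) = ks.filter (fun t => t = "feature_flags") :=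
    List.filter_congr (fun t _ => by unfold pvRankOf; split_ifs <;> simp_all)
  have e3 : ks.filter (fun t => pvRankOf t = 3) = ks.filter (fun t => t = "projects") :=
    List.filter_congr (fun t _ => by unfold pvRankOf; split_ifs <;> simp_all)
  have e4 : ks.filter (fun t => pvRankOf t = 4) = ks.filter (fun t => t = "units") :=
    List.filter_congr (fun t _ => by unfold pvRankOf; split_ifs <;> simp_all)
  have e5 : ks.filter (fun t => pvRankOf t = 5) = ks.filter (fun t => t = "users") :=
    List.filter_congr (fun t _ => by unfold pvRankOf; split_ifs <;> simp_all)
  have e6 : ks.filter (fun t => pvRankOf t = 6) = ks.filter (fun t => t = "financial_records") :=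
    List.filter_congr (fun t _ => by unfold pvRankOf; split_ifs <;> simp_all)
  -- A's remaining-keys filter is B's rank-7 bucket
  have e7 : ks.filter (fun t =>
        !(pvPriorityOrder.filter (fun p => ks.contains p)).contains t)
      = ks.filter (fun t => pvRankOf t = 7) :=
    List.filter_congr (fun t ht => by
      have : (pvPriorityOrder.filter (fun p => ks.contains p)).contains t
          = decide (t ∈ pvPriorityOrder) := by
        simp [List.mem_filter, ht]
      rw [this]
      by_cases hp : t ∈ pvPriorityOrder
      · have h7 : ¬ pvRankOf t = 7 := fun h => ((pvRank7_iff t).mp h) hp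
        simp [hp, h7]
      · simp [hp, (pvRank7_iff t).mpr hp])
  have hc := pvConcat_filters pvPriorityOrder ks hnd
  simp only [pvPriorityOrder, List.map_cons, List.map_nil, List.flatten_cons,
    List.flatten_nil, List.append_nil] at hc
  rw [show ["schema_migrations", "system_config", "feature_flags", "projects",
        "units", "users", "financial_records"] = pvPriorityOrder from rfl] at hc
  rw [← e0, ← e1, ← e2, ← e3, ← e4, ← e5, ← e6] at hc
  simp only [List.nil_append]
  rw [show List.filter ks.contains pvPriorityOrder
        = List.filter (fun p => ks.contains p) pvPriorityOrder from rfl, e7]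
  simp only [List.flatten_cons, List.flatten_nil, List.append_nil]
  rw [← hc]
  simp only [List.append_assoc]
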